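-- pv_equiv track=rewrite | github.com/ByteDance-Seed/DAComp | methods/spider-agent/spider_agent/controllers/python.py | update_working_directory
-- ===== SOURCE A (Python) =====
-- from typing import Any, Dict, Optional
--
-- def update_working_directory(current: str, changed: Optional[str] = None) -> str:
--     """ Resolves absolute path from the current working directory path and the argument of the `cd` command
--     @args:
--         current (str): the current working directory
--         changed (Optional[str]): the changed working directory, argument of shell `cd` command
--     @return:
--         new_path (str): absolute path of the new working directory in the container
--     """
--     if not changed:
--         return current
--     if changed[0] == "/":
--         current = ""
--
--     path = []
--     for segment in (current + "/" + changed).split("/"):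
--         if segment == "..":
--             if path:
--                 path.pop()
--         elif segment and segment != ".":
--             path.append(segment)
--     new_path = "/" + "/".join(path)
--     return new_path
-- ===== SOURCE B (Python) =====
-- from typing import Optional
--
-- def update_working_directory(current: str, changed: Optional[str] = None) -> str:
--     """Resolve the new absolute working directory after `cd changed`.
--
--     Walks the path segments right-to-left with an explicit index, keeping only
--     an integer count of pending `..` segments; surviving segments are appended
--     and the list reversed once at the end.
--     """
--     if not changed:
--         return current
--     base = "" if changed.startswith("/") else current
--     segs = (base + "/" + changed).split("/")
--     kept = []
--     skip = 0
--     i = len(segs) - 1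
--     while i >= 0:
--         seg = segs[i]
--         if seg == "..":
--             skip += 1
--         elif seg not in ("", "."):
--             if skip:
--                 skip -= 1
--             else:
--                 kept.append(seg)
--         i -= 1
--     kept.reverse()
--     return "/" + "/".join(kept)
-- ===== Notes on version B (the rewrite author's own statement) =====
-- stated objective: alternative
-- what changed: Replaces the forward pass with a list-as-stack (append/pop) by a reverse index-driven walk over the segments that maintains only an integer counter of pending parent-directory segments, appending survivors and reversing once at the end.
import Mathlib
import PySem

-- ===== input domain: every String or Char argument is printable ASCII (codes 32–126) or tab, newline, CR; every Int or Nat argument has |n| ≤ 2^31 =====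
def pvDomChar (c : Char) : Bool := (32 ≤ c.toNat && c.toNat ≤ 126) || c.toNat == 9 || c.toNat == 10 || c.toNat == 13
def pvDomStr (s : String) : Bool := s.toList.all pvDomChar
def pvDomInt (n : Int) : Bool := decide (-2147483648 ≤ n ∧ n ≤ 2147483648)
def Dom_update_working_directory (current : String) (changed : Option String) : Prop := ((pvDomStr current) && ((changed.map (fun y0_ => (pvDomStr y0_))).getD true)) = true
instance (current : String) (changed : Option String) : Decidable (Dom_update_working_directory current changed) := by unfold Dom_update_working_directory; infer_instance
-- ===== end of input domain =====

-- B resolves `cd` paths by a reverse index-driven walk with a pending parent-directory counter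
-- (appending survivors, one final reverse) instead of A's forward list-as-stack pass
-- (alternative decomposition, same cost).


-- ===== PORT A =====
-- A's loop body: push real segments, `..` pops the last kept one (if any)
def pvAStep (path : List String) (seg : String) : List String :=
  if seg = ".." then (if path = [] then path else path.dropLast)
  else if seg ≠ "" ∧ seg ≠ "." then path ++ [seg]
  else path

def update_working_directory (current : String) (changed : Option String) : String :=
  match changed with
  | none => current
  | some ch =>
    if ch = "" then current
    else
      let current := if PySem.Str.pyGet? ch 0 = some '/' then "" else current
      let segs := (PySem.Str.split? (current ++ "/" ++ ch) "/").getD []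
      let path := segs.foldl pvAStep []
      "/" ++ PySem.Str.join "/" path

-- ===== PORT B =====
-- B's while loop walks the segment list from the last index downward; here it is the
-- structurally identical recursion over the reversed list, threading (skip, kept).
def pvWalk : List String → Nat → List String → List String
  | [], _, kept => kept
  | seg :: rest, skip, kept =>
    if seg = ".." then pvWalk rest (skip + 1) kept
    else if seg = "" ∨ seg = "." then pvWalk rest skip kept
    else if skip ≠ 0 then pvWalk rest (skip - 1) kept
    else pvWalk rest skip (kept ++ [seg])

def update_working_directory_alt (current : String) (changed : Option String) : String :=
  match changed with
  | none => current
  | some ch =>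
    if ch = "" then current
    else
      let base := if PySem.Str.startswith ch "/" then "" else current
      let segs := (PySem.Str.split? (base ++ "/" ++ ch) "/").getD []
      "/" ++ PySem.Str.join "/" ((pvWalk segs.reverse 0 []).reverse)

-- ===== PRECONDITION & SPEC =====
def Spec_update_working_directory (current : String) (changed : Option String) (out : String) : Prop := out = update_working_directory_alt current changed
instance (current : String) (changed : Option String) (out : String) : Decidable (Spec_update_working_directory current changed out) := by unfold Spec_update_working_directory; infer_instance

-- ===== CLAIM (what is proved, stated in full; the proofs are below) =====
def Claim_equal_update_working_directory : Prop := ∀ (current : String) (changed : Option String), Dom_update_working_directory current changed → Spec_update_working_directory current changed (update_working_directory current changed)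

-- ===== LEMMAS AND PROOFS =====

-- proof-only: the pure value of pvWalk, returning (leftover skip, kept in encounter order)
def pvP : List String → Nat → Nat × List String
  | [], skip => (skip, [])
  | seg :: rest, skip =>
    if seg = ".." then pvP rest (skip + 1)
    else if seg = "" ∨ seg = "." then pvP rest skip
    else if skip ≠ 0 then pvP rest (skip - 1)
    else ((pvP rest 0).1, seg :: (pvP rest 0).2)

-- accumulator characterisation of pvWalk
theorem pvWalk_eq_acc (l : List String) (skip : Nat) (kept : List String) :
    pvWalk l skip kept = kept ++ (pvP l skip).2 := by
  induction l generalizing skip kept with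
  | nil => simp [pvWalk, pvP]
  | cons seg rest ih =>
    by_cases h1 : seg = ".."
    · simp [pvWalk, pvP, h1, ih]
    · by_cases h2 : seg = "" ∨ seg = "."
      · simp [pvWalk, pvP, h1, h2, ih]
      · by_cases h3 : skip ≠ 0
        · simp [pvWalk, pvP, h1, h2, h3, ih]
        · have h0 : skip = 0 := by omega
          subst h0
          simp [pvWalk, pvP, h1, h2, ih]

-- pop the last element k times (saturating, like A's `if path: path.pop()`)
def pvPopN (p : List String) : Nat → List String
  | 0 => p
  | k + 1 => pvPopN p.dropLast k

theorem pvPopN_nil (k : Nat) : pvPopN [] k = [] := by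
  induction k with
  | zero => rfl
  | succ k ih => simpa [pvPopN] using ih

theorem pvPopN_concat (p : List String) (a : String) (k : Nat) :
    pvPopN (p ++ [a]) (k + 1) = pvPopN p k := by
  simp [pvPopN]

-- the key invariant: A's forward stack pass over l.reverse, followed by skip pending pops,
-- equals the prefix popped (pvP l skip).1 times plus the reversed kept list of pvP
theorem pv_stack_eq_counter (l : List String) (skip : Nat) (path : List String) :
    pvPopN ((l.reverse).foldl pvAStep path) skip =
      pvPopN path (pvP l skip).1 ++ ((pvP l skip).2).reverse := by
  induction l generalizing skip path with
  | nil => simp [pvP]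
  | cons seg rest ih =>
    have hsplit : (seg :: rest).reverse.foldl pvAStep path
        = pvAStep (rest.reverse.foldl pvAStep path) seg := by
      simp [List.foldl_append]
    rw [hsplit]
    by_cases h1 : seg = ".."
    · have hstep : ∀ q, pvAStep q seg = (if q = [] then q else q.dropLast) := by
        intro q; simp [pvAStep, h1]
      rw [hstep]
      have hdl : ∀ q : List String, pvPopN (if q = [] then q else q.dropLast) skip
          = pvPopN q (skip + 1) := by
        intro q
        by_cases hq : q = []
        · simp [hq, pvPopN_nil, pvPopN]
        · simp [hq, pvPopN]
      rw [hdl, ih]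
      simp [pvP, h1]
    · by_cases h2 : seg = "" ∨ seg = "."
      · have hstep : pvAStep (rest.reverse.foldl pvAStep path) seg
            = rest.reverse.foldl pvAStep path := by
          rcases h2 with h | h <;> simp [pvAStep, h]
        rw [hstep, ih]
        simp [pvP, h1, h2]
      · have h2' : seg ≠ "" ∧ seg ≠ "." := by
          constructor <;> intro h <;> exact h2 (by simp [h])
        have hstep : pvAStep (rest.reverse.foldl pvAStep path) seg
            = rest.reverse.foldl pvAStep path ++ [seg] := by
          simp [pvAStep, h1, h2']
        rw [hstep]
        rcases hk : skip with _ | k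
        · rw [show pvPopN (rest.reverse.foldl pvAStep path ++ [seg]) 0
              = rest.reverse.foldl pvAStep path ++ [seg] from rfl]
          rw [show rest.reverse.foldl pvAStep path = pvPopN (rest.reverse.foldl pvAStep path) 0 from rfl, ih]
          simp [pvP, h1, h2]
        · rw [pvPopN_concat, ih]
          simp [pvP, h1, h2]

-- the two segment passes produce the same kept-segment list
theorem pv_pass_eq (segs : List String) :
    segs.foldl pvAStep [] = (pvWalk segs.reverse 0 []).reverse := by
  rw [pvWalk_eq_acc]
  have := pv_stack_eq_counter segs.reverse 0 []
  simpa [pvPopN, pvPopN_nil] using this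

-- `startswith "/"` is exactly `s[0] == '/'`
theorem pv_starts_iff (ch : String) :
    (PySem.Str.startswith ch "/" = true) ↔ (PySem.Str.pyGet? ch 0 = some '/') := by
  simp only [PySem.Str.startswith_eq, PySem.Str.pyGet?_eq]
  rw [PySem.Chars.startswith_iff]
  cases hl : ch.toList with
  | nil => simp [PySem.Chars.pyGet?_eq_listPyGet?, PySem.List.pyGet?]
  | cons c cs =>
    simp [PySem.Chars.pyGet?_eq_listPyGet?,
      List.cons_prefix_cons, eq_comm]

-- ===== VERDICT (by name: the statement is the Claim_ definition above) =====
theorem update_working_directory_spec : Claim_equal_update_working_directory := by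
  intro current changed _
  unfold Spec_update_working_directory update_working_directory update_working_directory_alt
  cases changed with
  | none => rfl
  | some ch =>
    by_cases hch : ch = ""
    · simp [hch]
    · simp only [hch, if_false]
      by_cases hs : PySem.Str.pyGet? ch 0 = some '/'
      · rw [if_pos hs, if_pos ((pv_starts_iff ch).mpr hs), pv_pass_eq]
      · rw [if_neg hs, if_neg (fun h => hs ((pv_starts_iff ch).mp h)), pv_pass_eq]
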